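-- pv_equiv track=rewrite | github.com/cgmb/guardonce | guardonce/util.py | next_nonempty_line
-- ===== SOURCE A (Python) =====
-- from itertools import islice
--
-- def next_nonempty_line(contents, start):
--     """
--     Returns the index of the first character of the next line containing
--     non-whitespace characters, or returns len(contents) if there is no such
--     line.
--     """
--     line_end = len(contents) - 1
--     for i, c in enumerate(islice(contents, start, None), start):
--         if c == '\n':
--            line_end = i
--         elif c not in ' \t':
--            break
--     return line_end + 1
-- ===== SOURCE B (Python) =====
-- def next_nonempty_line(contents, start):
--     """
--     Returns the index of the first character of the next line containing
--     non-whitespace characters, or returns len(contents) if there is no such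
--     line.
--     """
--     region = contents[start:]
--     p = start + (len(region) - len(region.lstrip(' \t\n')))
--     nl = contents.rfind('\n', start, p)
--     return nl + 1 if nl != -1 else len(contents)
-- ===== Notes on version B (the rewrite author's own statement) =====
-- stated objective: alternative
-- what changed: Replaces A's single combined loop (which tracks the last newline while scanning forward) by two library passes: lstrip finds the first non-blank character boundary p, then rfind searches backward for the last newline in [start, p).
import Mathlib
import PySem

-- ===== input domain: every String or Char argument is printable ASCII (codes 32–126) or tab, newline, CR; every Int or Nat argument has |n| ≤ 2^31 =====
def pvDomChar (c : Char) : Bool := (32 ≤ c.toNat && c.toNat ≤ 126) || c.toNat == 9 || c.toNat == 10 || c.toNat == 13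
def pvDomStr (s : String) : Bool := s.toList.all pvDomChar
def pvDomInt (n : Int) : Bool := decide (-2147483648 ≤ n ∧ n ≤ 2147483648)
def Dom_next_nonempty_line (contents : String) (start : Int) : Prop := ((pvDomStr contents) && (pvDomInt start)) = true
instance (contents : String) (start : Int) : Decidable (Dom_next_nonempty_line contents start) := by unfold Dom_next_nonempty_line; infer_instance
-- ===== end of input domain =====

-- B replaces A's single combined scan (tracking the last newline while searching for content)
-- by two library-style passes: an lstrip boundary followed by a backward rfind for the newline.
-- Objective: alternative (same cost, different decomposition).

-- ===== PORT A =====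
-- the for-loop over enumerate(islice(contents, start, None), start): i is the running index,
-- lineEnd the Python variable line_end; branch order as in A.
def pvLoopA : List Char → Int → Int → Int
  | [], _, lineEnd => lineEnd
  | c :: rest, i, lineEnd =>
    if c = '\n' then pvLoopA rest (i + 1) i
    else if ¬(c = ' ' ∨ c = '\t') then lineEnd
    else pvLoopA rest (i + 1) lineEnd

-- islice(contents, start, None) = drop start.toNat, exact for 0 ≤ start (Pre_); start < 0 raises ValueError.
def next_nonempty_line (contents : String) (start : Int) : Int :=
  pvLoopA (contents.toList.drop start.toNat) start ((contents.toList.length : Int) - 1) + 1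

-- ===== PORT B =====
def next_nonempty_line_alt (contents : String) (start : Int) : Int :=
  let region := contents.toList.drop start.toNat   -- contents[start:], exact for 0 ≤ start
  -- region.lstrip(' \t\n'): drop leading chars from the set — exact, ported by hand
  let stripped := region.dropWhile (fun c => c == ' ' || c == '\t' || c == '\n')
  let p : Int := start + ((region.length : Int) - (stripped.length : Int))
  let nl := PySem.Str.rfindFrom contents "\n" start (some p)   -- contents.rfind('\n', start, p)
  if nl ≠ -1 then nl + 1 else ((contents.toList.length : Int))

-- ===== PRECONDITION & SPEC =====
-- Pre_ excludes exactly start < 0, on which A raises ValueError (islice rejects a negative start).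
def Pre_next_nonempty_line (contents : String) (start : Int) : Prop := 0 ≤ start
instance (contents : String) (start : Int) : Decidable (Pre_next_nonempty_line contents start) := by unfold Pre_next_nonempty_line; infer_instance
def pvWitness_next_nonempty_line : String × Int := ("  \n x", 0)

def Spec_next_nonempty_line (contents : String) (start : Int) (out : Int) : Prop := out = next_nonempty_line_alt contents start
instance (contents : String) (start : Int) (out : Int) : Decidable (Spec_next_nonempty_line contents start out) := by unfold Spec_next_nonempty_line; infer_instance

-- ===== CLAIM (what is proved, stated in full; the proofs are below) =====
def Claim_equal_next_nonempty_line : Prop := ∀ (contents : String) (start : Int), Dom_next_nonempty_line contents start → Pre_next_nonempty_line contents start → Spec_next_nonempty_line contents start (next_nonempty_line contents start)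


-- ===== LEMMAS AND PROOFS =====

-- the shared whitespace set {' ', '\t', '\n'}
def pvWs (c : Char) : Bool := c == ' ' || c == '\t' || c == '\n'
def pvLastNl : List Char → Option Nat
  | [] => none
  | c :: rest =>
    match pvLastNl rest with
    | some j => some (j + 1)
    | none => if c = '\n' then some 0 else none
theorem pvLoopA_eq (cs : List Char) : ∀ (i lineEnd : Int),
    pvLoopA cs i lineEnd =
      match pvLastNl (cs.takeWhile pvWs) with
      | some j => i + j
      | none => lineEnd := by
  induction cs with
  | nil => intro i le; simp [pvLoopA, pvLastNl]
  | cons c rest ih =>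
    intro i le
    by_cases hn : c = '\n'
    · subst hn
      have hws : pvWs '\n' = true := rfl
      simp only [pvLoopA, List.takeWhile_cons, hws, if_true, ih]
      rcases h : pvLastNl (rest.takeWhile pvWs) with _ | j
      · simp only [pvLastNl, h]
        norm_num
      · simp only [pvLastNl, h]
        push_cast
        ring_nf
    · by_cases hw : c = ' ' ∨ c = '\t'
      · have hws : pvWs c = true := by rcases hw with h | h <;> simp [pvWs, h]
        simp only [pvLoopA, if_neg hn, List.takeWhile_cons, hws, if_true, ih]
        rcases h : pvLastNl (rest.takeWhile pvWs) with _ | j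
        · simp [hw, pvLastNl, h, hn]
        · simp only [pvLastNl, h, if_neg (not_not_intro hw)]
          push_cast
          ring_nf
      · have hws : pvWs c = false := by
          have h1 : ¬ c = ' ' := fun h => hw (Or.inl h)
          have h2 : ¬ c = '\t' := fun h => hw (Or.inr h)
          simp [pvWs, h1, h2, hn]
        simp [pvLoopA, hn, hw, hws, pvLastNl]

theorem pvLastNl_append_singleton (xs : List Char) (x : Char) :
    pvLastNl (xs ++ [x]) = if x = '\n' then some xs.length else pvLastNl xs := by
  induction xs with
  | nil =>
    show pvLastNl [x] = _
    by_cases hx : x = '\n'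
    · simp only [pvLastNl, hx, if_pos rfl, List.length_nil]
    · simp only [pvLastNl, hx, ite_false]
  | cons c rest ih =>
    simp only [List.cons_append, pvLastNl, ih, List.length_cons]
    by_cases hx : x = '\n'
    · simp only [hx, ite_true]
    · simp only [hx, ite_false]

theorem pvPrefixNl (s : List Char) : (['\n'].isPrefixOf s) = true ↔ s[0]? = some '\n' := by
  cases s with
  | nil => simp [List.isPrefixOf]
  | cons c rest =>
    constructor
    · intro h
      have h2 := List.isPrefixOf_iff_prefix.mp h
      rw [List.cons_prefix_cons] at h2
      simp [h2.1.symm]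
    · intro h
      simp only [List.getElem?_cons_zero, Option.some.injEq] at h
      subst h
      simp [List.isPrefixOf_iff_prefix, List.cons_prefix_cons]

theorem pvGo_eq (s : List Char) : ∀ j : Nat,
    PySem.Chars.rfind.go s ['\n'] j =
      match pvLastNl (s.take (j + 1)) with
      | some k => (k : Int)
      | none => -1 := by
  intro j
  induction j with
  | zero =>
    simp only [PySem.Chars.rfind.go]
    rcases hs : s with _ | ⟨c, rest⟩
    · simp [pvLastNl, List.isPrefixOf]
    · have h0 : (c :: rest)[0]? = some c := rfl
      by_cases hc : c = '\n'
      · rw [if_pos (by rw [pvPrefixNl, h0, hc])]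
        simp [List.take_succ, pvLastNl, hc]
      · rw [if_neg (by rw [pvPrefixNl, h0]; simp [hc])]
        simp [List.take_succ, pvLastNl, hc]
  | succ j ih =>
    have hgo : PySem.Chars.rfind.go s ['\n'] (j + 1) =
        if ['\n'].isPrefixOf (s.drop (j + 1)) then ((j : Int) + 1)
        else PySem.Chars.rfind.go s ['\n'] j := by
      simp only [PySem.Chars.rfind.go]
      rfl
    rw [hgo]
    have htake : s.take (j + 1 + 1) = s.take (j + 1) ++ (s[j + 1]?).toList :=
      List.take_succ
    have hpref : (['\n'].isPrefixOf (s.drop (j + 1))) = true ↔ s[j + 1]? = some '\n' := by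
      rw [pvPrefixNl]
      simp [List.getElem?_drop]
    by_cases hc : s[j + 1]? = some '\n'
    · have hlen : j + 1 < s.length := by
        by_contra h
        rw [List.getElem?_eq_none (by omega)] at hc
        cases hc
      rw [if_pos (hpref.mpr hc)]
      rw [htake, hc]
      simp only [Option.toList_some, pvLastNl_append_singleton, if_pos rfl,
        List.length_take]
      have hm : min (j + 1) s.length = j + 1 := by omega
      rw [hm]
      push_cast
      ring_nf
    · rw [if_neg (by simp [hpref, hc]), ih, htake]
      rcases h0 : s[j + 1]? with _ | c
      · simp
      · have hcne : c ≠ '\n' := by rintro rfl; exact hc h0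
        simp [pvLastNl_append_singleton, hcne]

theorem pvRfind_eq (seg : List Char) :
    PySem.Chars.rfind seg ['\n'] =
      match pvLastNl seg with
      | some k => (k : Int)
      | none => -1 := by
  rw [PySem.Chars.rfind, pvGo_eq]
  rw [List.take_of_length_le (by omega)]

theorem pvRfind_none (seg : List Char) (h : pvLastNl seg = none) :
    PySem.Chars.rfind seg ['\n'] = -1 := by
  rw [pvRfind_eq, h]

theorem pvRfind_some (seg : List Char) (k : Nat) (h : pvLastNl seg = some k) :
    PySem.Chars.rfind seg ['\n'] = (k : Int) := by
  rw [pvRfind_eq, h]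

theorem pvTake_takeWhile (l : List Char) :
    l.take ((l.takeWhile pvWs).length) = l.takeWhile pvWs :=
  (List.prefix_iff_eq_take.mp (List.takeWhile_prefix _)).symm

theorem pvLen_split (l : List Char) :
    (l.takeWhile pvWs).length + (l.dropWhile pvWs).length = l.length := by
  conv_rhs => rw [← List.takeWhile_append_dropWhile (p := pvWs) (l := l)]
  rw [List.length_append]
theorem pv_main (contents : String) (start : Int) (hpre : 0 ≤ start) :
    next_nonempty_line contents start = next_nonempty_line_alt contents start := by
  simp only [next_nonempty_line, next_nonempty_line_alt]
  have hwsfun : (fun c : Char => c == ' ' || c == '\t' || c == '\n') = pvWs := by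
    funext c; simp [pvWs]
  rw [hwsfun]
  set l := contents.toList with hl
  set region := l.drop start.toNat with hreg
  set tw := region.takeWhile pvWs with htw
  have hsplit : tw.length + (region.dropWhile pvWs).length = region.length :=
    pvLen_split region
  have hstart : (start.toNat : Int) = start := Int.toNat_of_nonneg hpre
  have hp : start + ((region.length : Int) - ((region.dropWhile pvWs).length : Int))
      = start + (tw.length : Int) := by omega
  rw [hp]
  have hregionlen : region.length = l.length - start.toNat := by
    simp [hreg]
  rw [PySem.Str.rfindFrom_eq]
  have hnl : ("\n".toList : List Char) = ['\n'] := rfl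
  rw [hnl]
  rw [pvLoopA_eq]
  by_cases hbig : l.length < start.toNat
  · have hregnil : region = [] := by
      rw [hreg, List.drop_eq_nil_iff]; omega
    have htwnil : tw = [] := by rw [htw, hregnil]; rfl
    rw [htwnil]
    have hres : PySem.Chars.rfindFrom l ['\n'] start (some (start + (([] : List Char).length : Int))) = -1 := by
      simp only [PySem.Chars.rfindFrom]
      split_ifs <;> omega
    rw [hres]
    simp only [pvLastNl, hregnil, List.takeWhile_nil]
    norm_num
  · have hle : start.toNat ≤ l.length := by omega
    have htwle : tw.length ≤ region.length := by
      rw [htw]; exact (List.takeWhile_sublist pvWs).length_le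
    have hplen : start.toNat + tw.length ≤ l.length := by omega
    have hseg : (l.take (start + (tw.length : Int)).toNat).drop start.toNat = tw := by
      rw [List.drop_take]
      have h1 : (start + (tw.length : Int)).toNat = start.toNat + tw.length := by omega
      rw [h1]
      have h2 : start.toNat + tw.length - start.toNat = tw.length := by omega
      rw [h2, ← hreg, htw]
      exact pvTake_takeWhile region
    have hres : PySem.Chars.rfindFrom l ['\n'] start (some (start + (tw.length : Int))) =
        match pvLastNl tw with
        | some k => start + (k : Int)
        | none => -1 := by
      simp only [PySem.Chars.rfindFrom]
      split_ifs <;> try omega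
      all_goals rename_i hr
      · rw [hseg] at hr
        rcases hk : pvLastNl tw with _ | k
        · rfl
        · rw [pvRfind_some tw k hk] at hr
          exfalso; omega
      · rcases hk : pvLastNl tw with _ | k
        · rw [hseg, pvRfind_none tw hk] at hr
          exact absurd rfl hr
        · rw [hseg, pvRfind_some tw k hk]
    rw [hres]
    rcases pvLastNl tw with _ | k
    · norm_num
    · have hne : start + (k : Int) ≠ -1 := by omega
      simp only [ne_eq, hne, not_false_iff, if_true]

-- ===== VERDICT (by name: the statement is the Claim_ definition above) =====
theorem next_nonempty_line_spec : Claim_equal_next_nonempty_line := by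
  intro contents start _hdom hpre
  unfold Spec_next_nonempty_line
  exact pv_main contents start hpre
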